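-- pv_equiv track=rewrite | github.com/BarryZ807/DSC20 | homeworks/hw08.py | compute_max_string
-- ===== SOURCE A (Python) =====
-- def compute_max_string(base, pattern):
--     """
--     a recursive function that takes a base string and a non-empty pattern
--     string, and computes the length of the largest substring of the base that
--     starts and ends with the pattern. If no match is found, return 0.
--
--     >>> compute_max_string("jumpsjump", "jump")
--     9
--     >>> compute_max_string("hwhwhw", "hwh")
--     5
--     >>> compute_max_string("frontsdakonsakdna", "front")
--     5
--     >>> compute_max_string("life", "life")
--     4
--
--     >>> compute_max_string("tatatathshejtata", "ta")
--     16
--     >>> compute_max_string("BarryaB", "Ba")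
--     2
--     >>> compute_max_string("zzszszsaaszzzszzs", "zzs")
--     17
--     """
--     if len(base) == 0:
--         return 0
--     else:
--         if base[0:len(pattern)] == pattern and base[-len(pattern):] == pattern:
--             return len(base)
--         elif base[0:len(pattern)] == pattern:
--             return compute_max_string(base[:-1], pattern)
--         elif base[-len(pattern):] == pattern:
--             return compute_max_string(base[1:], pattern)
--         else:
--             return compute_max_string(base[1:], pattern)
-- ===== SOURCE B (Python) =====
-- def compute_max_string(base, pattern):
--     p = len(pattern)
--     lo, hi = 0, len(base)
--     while lo < hi:
--         starts = hi - lo >= p and base[lo:lo + p] == pattern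
--         ends = hi - lo >= p and base[hi - p:hi] == pattern
--         if starts and ends:
--             return hi - lo
--         elif starts:
--             hi -= 1
--         else:
--             lo += 1
--     return 0
-- ===== Notes on version B (the rewrite author's own statement) =====
-- stated objective: faster
-- what changed: Replaced A's recursion, which copies a shrunk string (base[:-1] or base[1:]) at every step, by an iterative two-pointer window [lo, hi) over the original string that only compares the two length-m boundary slices per step.
-- outside the precondition, e.g. on compute_max_string('a', ''): A returns 0, B returns 1
import Mathlib
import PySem

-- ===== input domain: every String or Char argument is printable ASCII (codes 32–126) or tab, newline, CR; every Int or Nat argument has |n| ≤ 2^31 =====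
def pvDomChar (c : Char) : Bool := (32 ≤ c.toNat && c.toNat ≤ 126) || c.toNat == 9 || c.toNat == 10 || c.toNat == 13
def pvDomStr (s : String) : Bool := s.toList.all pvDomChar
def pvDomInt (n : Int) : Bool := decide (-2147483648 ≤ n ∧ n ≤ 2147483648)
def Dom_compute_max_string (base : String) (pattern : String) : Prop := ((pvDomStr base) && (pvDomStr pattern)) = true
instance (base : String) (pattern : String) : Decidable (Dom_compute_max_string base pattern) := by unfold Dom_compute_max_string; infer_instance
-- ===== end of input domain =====

-- B replaces A's recursion (which copies a shrunk string each step) by an iterative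
-- two-pointer loop over indices into the original string; return-value equivalence only.

-- ===== PORT A =====
-- recursive shrink, literal transliteration of A (strings as their char lists)
def pvGoA (base pattern : List Char) : Int :=
  if h0 : base.length = 0 then 0
  else
    if PySem.List.slice base (some 0) (some (pattern.length : Int)) = pattern ∧
       PySem.List.slice base (some (-(pattern.length : Int))) none = pattern then
      (base.length : Int)
    else if PySem.List.slice base (some 0) (some (pattern.length : Int)) = pattern then
      pvGoA (PySem.List.slice base none (some (-1))) pattern
    else if PySem.List.slice base (some (-(pattern.length : Int))) none = pattern then
      pvGoA (PySem.List.slice base (some 1) none) pattern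
    else
      pvGoA (PySem.List.slice base (some 1) none) pattern
termination_by base.length
decreasing_by
  · rw [PySem.List.slice_to_neg_one]; simp [List.length_dropLast]; omega
  · rw [PySem.List.slice_from_one]; simp [List.length_tail]; omega
  · rw [PySem.List.slice_from_one]; simp [List.length_tail]; omega

def compute_max_string (base : String) (pattern : String) : Int :=
  pvGoA base.toList pattern.toList

-- ===== PORT B =====
-- iterative two-pointer window [lo, hi) over the original base
def pvGoB (base pattern : List Char) (p lo hi : Nat) : Int :=
  if h : lo < hi then
    let starts := decide (p ≤ hi - lo) &&
      decide (PySem.List.slice base (some (lo : Int)) (some ((lo : Int) + (p : Int))) = pattern)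
    let ends := decide (p ≤ hi - lo) &&
      decide (PySem.List.slice base (some ((hi : Int) - (p : Int))) (some (hi : Int)) = pattern)
    if starts && ends then (hi : Int) - (lo : Int)
    else if starts then pvGoB base pattern p lo (hi - 1)
    else pvGoB base pattern p (lo + 1) hi
  else 0
termination_by hi - lo
decreasing_by
  · omega
  · omega

def compute_max_string_alt (base : String) (pattern : String) : Int :=
  pvGoB base.toList pattern.toList pattern.toList.length 0 base.toList.length

-- ===== PRECONDITION & SPEC =====
-- Pre_ excludes only the empty pattern (the docstring requires a non-empty pattern): there A's 0
-- is an accident of Python's base[-0:] slicing while B naturally returns len(base).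
def Pre_compute_max_string (base : String) (pattern : String) : Prop := pattern ≠ ""
instance (base : String) (pattern : String) : Decidable (Pre_compute_max_string base pattern) := by
  unfold Pre_compute_max_string; infer_instance

def pvWitness_compute_max_string : String × String := ("jumpsjump", "jump")

def Spec_compute_max_string (base : String) (pattern : String) (out : Int) : Prop := out = compute_max_string_alt base pattern
instance (base : String) (pattern : String) (out : Int) : Decidable (Spec_compute_max_string base pattern out) := by unfold Spec_compute_max_string; infer_instance

-- ===== CLAIM (what is proved, stated in full; the proofs are below) =====
def Claim_equal_compute_max_string : Prop := ∀ (base : String) (pattern : String), Dom_compute_max_string base pattern → Pre_compute_max_string base pattern → Spec_compute_max_string base pattern (compute_max_string base pattern)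

-- ===== LEMMAS AND PROOFS =====

lemma pv_dropLast_take {α : Type} (l : List α) (n : Nat) (h : n ≤ l.length) :
    (l.take n).dropLast = l.take (n - 1) := by
  rcases lt_or_eq_of_le h with h' | h'
  · exact List.dropLast_take h'
  · subst h'; simp [List.dropLast_eq_take]

lemma pv_tail_take {α : Type} (l : List α) (n : Nat) :
    (l.take n).tail = l.tail.take (n - 1) := by
  cases l with
  | nil => simp
  | cons a t => cases n with
    | zero => simp
    | succ m => simp

lemma pvGoA_unfold (base pat : List Char) (h : ¬ base.length = 0) :
    pvGoA base pat =
      if PySem.List.slice base (some 0) (some (pat.length : Int)) = pat ∧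
         PySem.List.slice base (some (-(pat.length : Int))) none = pat then (base.length : Int)
      else if PySem.List.slice base (some 0) (some (pat.length : Int)) = pat then
        pvGoA (PySem.List.slice base none (some (-1))) pat
      else if PySem.List.slice base (some (-(pat.length : Int))) none = pat then
        pvGoA (PySem.List.slice base (some 1) none) pat
      else pvGoA (PySem.List.slice base (some 1) none) pat := by
  rw [pvGoA, dif_neg h]

lemma pvGoB_unfold (base pat : List Char) (p lo hi : Nat) (h : lo < hi) :
    pvGoB base pat p lo hi =
      if (p ≤ hi - lo ∧ PySem.List.slice base (some (lo : Int)) (some ((lo : Int) + (p : Int))) = pat) ∧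
         (p ≤ hi - lo ∧ PySem.List.slice base (some ((hi : Int) - (p : Int))) (some (hi : Int)) = pat) then
        (hi : Int) - (lo : Int)
      else if (p ≤ hi - lo ∧ PySem.List.slice base (some (lo : Int)) (some ((lo : Int) + (p : Int))) = pat) then
        pvGoB base pat p lo (hi - 1)
      else pvGoB base pat p (lo + 1) hi := by
  rw [pvGoB, dif_pos h]
  simp only [Bool.and_eq_true, decide_eq_true_eq]

-- the loop on window [lo, hi) computes A on the corresponding substring
lemma pv_main (l pat : List Char) (hp : pat ≠ []) :
    ∀ (n lo hi : Nat), hi - lo ≤ n → lo ≤ hi → hi ≤ l.length →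
      pvGoB l pat pat.length lo hi = pvGoA ((l.drop lo).take (hi - lo)) pat := by
  intro n
  induction n with
  | zero =>
    intro lo hi h1 h2 h3
    have hee : hi = lo := by omega
    subst hee
    rw [pvGoB, pvGoA]
    simp
  | succ n ih =>
    intro lo hi h1 h2 h3
    by_cases hlt : lo < hi
    · have hplen : 0 < pat.length := by
        cases pat with
        | nil => exact absurd rfl hp
        | cons a t => simp
      have hwlen : ((l.drop lo).take (hi - lo)).length = hi - lo := by
        rw [List.length_take, List.length_drop]; omega
      have hwne : ¬ ((l.drop lo).take (hi - lo)).length = 0 := by omega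
      -- prefix condition of A on the window ↔ B's `starts`
      have hpre : (PySem.List.slice ((l.drop lo).take (hi - lo)) (some 0) (some (pat.length : Int)) = pat) ↔
          (pat.length ≤ hi - lo ∧
           PySem.List.slice l (some (lo : Int)) (some ((lo : Int) + (pat.length : Int))) = pat) := by
        rw [PySem.List.slice_zero_start, PySem.List.slice_to_natCast,
            PySem.List.slice_natCast_add]
        constructor
        · intro hc
          have hlen := congrArg List.length hc
          rw [List.length_take, hwlen] at hlen
          have hple : pat.length ≤ hi - lo := by omega
          rw [List.take_take, Nat.min_eq_left hple] at hc
          exact ⟨hple, hc⟩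
        · rintro ⟨hple, hc⟩
          rw [List.take_take, Nat.min_eq_left hple]
          exact hc
      -- suffix condition of A on the window ↔ B's `ends`
      have hsuf : (PySem.List.slice ((l.drop lo).take (hi - lo)) (some (-(pat.length : Int))) none = pat) ↔
          (pat.length ≤ hi - lo ∧
           PySem.List.slice l (some ((hi : Int) - (pat.length : Int))) (some (hi : Int)) = pat) := by
        rw [PySem.List.slice_from_neg_natCast _ _ hplen, hwlen]
        constructor
        · intro hc
          have hlen := congrArg List.length hc
          rw [List.length_drop, hwlen] at hlen
          have hple : pat.length ≤ hi - lo := by omega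
          have key : List.drop (hi - lo - pat.length) (List.take (hi - lo) (l.drop lo)) =
              List.take (hi - (hi - pat.length)) (List.drop (hi - pat.length) l) := by
            rw [List.drop_take, List.drop_drop]
            congr 1
            · omega
            · congr 1; omega
          rw [key] at hc
          refine ⟨hple, ?_⟩
          rw [show ((hi : Int) - (pat.length : Int)) = ((hi - pat.length : Nat) : Int) by omega,
              PySem.List.slice_natCast]
          exact hc
        · rintro ⟨hple, hc⟩
          rw [show ((hi : Int) - (pat.length : Int)) = ((hi - pat.length : Nat) : Int) by omega,
              PySem.List.slice_natCast] at hc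
          have key : List.drop (hi - lo - pat.length) (List.take (hi - lo) (l.drop lo)) =
              List.take (hi - (hi - pat.length)) (List.drop (hi - pat.length) l) := by
            rw [List.drop_take, List.drop_drop]
            congr 1
            · omega
            · congr 1; omega
          rw [key]
          exact hc
      have hdl : ((l.drop lo).take (hi - lo)).dropLast = (l.drop lo).take (hi - 1 - lo) := by
        rw [pv_dropLast_take _ _ (by rw [List.length_drop]; omega)]
        congr 1
        omega
      have htl : ((l.drop lo).take (hi - lo)).tail = (l.drop (lo + 1)).take (hi - (lo + 1)) := by
        rw [pv_tail_take, List.tail_drop]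
        congr 1
      rw [pvGoB_unfold _ _ _ _ _ hlt, pvGoA_unfold _ _ hwne]
      simp only [hpre, hsuf]
      split_ifs with hc1 hc2 hc3
      · rw [hwlen]; omega
      · rw [PySem.List.slice_to_neg_one, hdl]
        exact ih lo (hi - 1) (by omega) (by omega) (by omega)
      · rw [PySem.List.slice_from_one, htl]
        exact ih (lo + 1) hi (by omega) (by omega) (by omega)
      · rw [PySem.List.slice_from_one, htl]
        exact ih (lo + 1) hi (by omega) (by omega) (by omega)
    · have hee : hi = lo := by omega
      subst hee
      rw [pvGoB, pvGoA]
      simp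

-- ===== VERDICT (by name: the statement is the Claim_ definition above) =====
theorem compute_max_string_spec : Claim_equal_compute_max_string := by
  intro base pattern _ hpre
  unfold Spec_compute_max_string compute_max_string compute_max_string_alt
  have hp : pattern.toList ≠ [] := by
    intro h
    exact hpre (String.toList_inj.mp (by rw [h]; rfl))
  rw [pv_main base.toList pattern.toList hp base.toList.length 0 base.toList.length
      (by omega) (by omega) (by omega)]
  rw [Nat.sub_zero, List.drop_zero, List.take_length]
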